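-- pv_equiv track=rewrite | github.com/green-fox-academy/gaborvrg | week-02/day-04/isinlist_06.py | numbercheck
-- ===== SOURCE A (Python) =====
-- def numbercheck(lisst, find):
--     out = False
--     test_len = 0
--
--     for l in lisst:
--         for f in find:
--             if l == f:
--                 test_len += 1
--                 if test_len == len(find):
--                     out = True
--     return out
-- ===== SOURCE B (Python) =====
-- def numbercheck(lisst, find):
--     counts = {}
--     for l in lisst:
--         counts[l] = counts.get(l, 0) + 1
--     total = 0
--     for f in find:
--         total += counts.get(f, 0)
--     return len(find) > 0 and total >= len(find)
-- ===== Notes on version B (the rewrite author's own statement) =====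
-- stated objective: faster
-- what changed: Replace the nested scan (for every element of lisst scan all of find) by a single hash-count pass over lisst plus one pass over find, and return the closed-form condition len(find)>0 and total matches >= len(find) instead of flagging inside the loop.
import Mathlib
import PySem

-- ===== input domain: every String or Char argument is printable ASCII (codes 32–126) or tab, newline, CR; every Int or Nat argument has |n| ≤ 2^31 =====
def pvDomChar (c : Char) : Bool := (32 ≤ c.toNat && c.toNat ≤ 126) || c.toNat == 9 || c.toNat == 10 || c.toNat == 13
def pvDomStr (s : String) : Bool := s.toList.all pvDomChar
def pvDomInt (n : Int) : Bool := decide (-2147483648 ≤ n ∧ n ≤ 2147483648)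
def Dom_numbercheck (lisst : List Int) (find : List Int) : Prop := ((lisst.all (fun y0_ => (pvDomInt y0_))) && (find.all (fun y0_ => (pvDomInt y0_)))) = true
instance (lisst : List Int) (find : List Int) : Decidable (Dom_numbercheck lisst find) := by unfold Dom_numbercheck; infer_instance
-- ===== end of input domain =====

-- B replaces A's nested scans by one counting pass over lisst and one pass over find (asymptotically faster).

-- ===== PORT A =====
def numbercheck (lisst : List Int) (find : List Int) : Bool :=
  -- state (out, test_len)
  (lisst.foldl (fun (s : Bool × Nat) l =>
      find.foldl (fun (s : Bool × Nat) f =>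
        if l == f then
          ((if s.2 + 1 == find.length then true else s.1), s.2 + 1)
        else s) s) (false, 0)).1

-- ===== PORT B =====
def numbercheck_alt (lisst : List Int) (find : List Int) : Bool :=
  let counts : PySem.Dict Int Int :=
    lisst.foldl (fun d l => d.insert l (d.getD l 0 + 1)) PySem.Dict.empty
  let total : Int := find.foldl (fun t f => t + counts.getD f 0) 0
  decide (0 < find.length ∧ (find.length : Int) ≤ total)

-- ===== PRECONDITION & SPEC =====
def Spec_numbercheck (lisst : List Int) (find : List Int) (out : Bool) : Prop := out = numbercheck_alt lisst find
instance (lisst : List Int) (find : List Int) (out : Bool) : Decidable (Spec_numbercheck lisst find out) := by unfold Spec_numbercheck; infer_instance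

-- ===== CLAIM (what is proved, stated in full; the proofs are below) =====
def Claim_equal_numbercheck : Prop := ∀ (lisst : List Int) (find : List Int), Dom_numbercheck lisst find → Spec_numbercheck lisst find (numbercheck lisst find)

-- ===== LEMMAS AND PROOFS =====

-- A's inner loop: test_len gains (count of l in fs) and out tracks "len(find) was hit".
theorem nc_inner (l : Int) (L : Nat) (fs : List Int) : ∀ (t : Nat),
    fs.foldl (fun (s : Bool × Nat) f =>
        if l == f then ((if s.2 + 1 == L then true else s.1), s.2 + 1) else s)
      (decide (1 ≤ L ∧ L ≤ t), t)
    = (decide (1 ≤ L ∧ L ≤ t + fs.count l), t + fs.count l) := by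
  induction fs with
  | nil => intro t; simp
  | cons f fs ih =>
    intro t
    by_cases hp : l = f
    · subst hp
      have h1 : (if t + 1 == L then true else decide (1 ≤ L ∧ L ≤ t)) = decide (1 ≤ L ∧ L ≤ t + 1) := by
        by_cases h : t + 1 = L
        · simp [h]; omega
        · simp only [beq_iff_eq, h, if_false]
          by_cases hL : L ≤ t
          · simp [hL, Nat.le_succ_of_le hL]
          · simp [hL, show ¬L ≤ t + 1 by omega]
      simp only [List.foldl_cons, BEq.rfl, if_true, h1]
      rw [ih (t + 1)]
      have hc : (l :: fs).count l = fs.count l + 1 := by simp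
      rw [hc, show t + 1 + fs.count l = t + (fs.count l + 1) from by omega]
    · have hb : (l == f) = false := by simp [hp]
      simp only [List.foldl_cons, hb, Bool.false_eq_true, if_false]
      rw [ih t]
      have h2 : (f == l) = false := by simp [Ne.symm hp]
      simp [List.count_cons, h2]

-- A's outer loop accumulates the total number of matching pairs.
theorem nc_outer (find : List Int) (ls : List Int) : ∀ (t : Nat),
    ls.foldl (fun (s : Bool × Nat) l =>
        find.foldl (fun (s : Bool × Nat) f =>
          if l == f then ((if s.2 + 1 == find.length then true else s.1), s.2 + 1) else s) s)
      (decide (1 ≤ find.length ∧ find.length ≤ t), t)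
    = (decide (1 ≤ find.length ∧ find.length ≤ t + (ls.map (fun l => find.count l)).sum),
       t + (ls.map (fun l => find.count l)).sum) := by
  induction ls with
  | nil => intro t; simp
  | cons l ls ih =>
    intro t
    simp only [List.foldl_cons]
    rw [nc_inner l find.length find t, ih (t + find.count l)]
    have hs : ((l :: ls).map (fun l => find.count l)).sum
        = find.count l + (ls.map (fun l => find.count l)).sum := by simp
    rw [hs, show t + find.count l + (ls.map (fun l => find.count l)).sum
        = t + (find.count l + (ls.map (fun l => find.count l)).sum) from by omega]

theorem nc_A_char (lisst find : List Int) :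
    numbercheck lisst find
    = decide (1 ≤ find.length ∧ find.length ≤ (lisst.map (fun l => find.count l)).sum) := by
  unfold numbercheck
  have h0 : (decide (1 ≤ find.length ∧ find.length ≤ 0) : Bool) = false := by
    exact decide_eq_false (by omega)
  rw [show ((false, 0) : Bool × Nat) = (decide (1 ≤ find.length ∧ find.length ≤ 0), 0) from by rw [h0]]
  rw [nc_outer find lisst 0]
  simp

-- double counting: Σ_{l∈ls} count of l in fs = Σ_{f∈fs} count of f in ls
theorem nc_sum_if (l : Int) (fs : List Int) :
    (fs.map (fun f => if l == f then (1 : Nat) else 0)).sum = fs.count l := by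
  induction fs with
  | nil => simp
  | cons f fs ih =>
    simp only [List.map_cons, List.sum_cons, ih, List.count_cons]
    by_cases hp : l = f
    · subst hp; simp; omega
    · have h1 : (l == f) = false := by simp [hp]
      have h2 : (f == l) = false := by simp [Ne.symm hp]
      simp [h1, h2]

theorem nc_swap (ls fs : List Int) :
    (ls.map (fun l => fs.count l)).sum = (fs.map (fun f => ls.count f)).sum := by
  induction ls with
  | nil => simp
  | cons l ls ih =>
    have hstep : (fs.map (fun f => (l :: ls).count f)).sum
        = (fs.map (fun f => ls.count f)).sum + (fs.map (fun f => if l == f then (1 : Nat) else 0)).sum := by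
      induction fs with
      | nil => simp
      | cons f fs ihf =>
        simp only [List.map_cons, List.sum_cons, List.count_cons]
        by_cases hp : f = l
        · subst hp; simp; omega
        · have h1 : (l == f) = false := by simp [Ne.symm hp]
          simp [h1]; omega
    simp only [List.map_cons, List.sum_cons, ih, hstep, nc_sum_if]
    omega

theorem nc_B_total (cnt : Int → Int) (fs : List Int) : ∀ (a : Int),
    fs.foldl (fun t f => t + cnt f) a = a + (fs.map cnt).sum := by
  induction fs with
  | nil => intro a; simp
  | cons f fs ih => intro a; simp only [List.foldl_cons, List.map_cons, List.sum_cons, ih]; ring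

theorem nc_B_char (lisst find : List Int) :
    numbercheck_alt lisst find
    = decide (1 ≤ find.length ∧ find.length ≤ (find.map (fun f => lisst.count f)).sum) := by
  simp only [numbercheck_alt]
  rw [PySem.Dict.foldl_insert_getD_add_one_eq_counter lisst]
  rw [nc_B_total (fun f => (PySem.Dict.counter lisst).getD f 0) find 0]
  have hT : (find.map (fun f => (PySem.Dict.counter lisst).getD f 0)).sum
      = (((find.map (fun f => lisst.count f)).sum : Nat) : Int) := by
    induction find with
    | nil => simp
    | cons f fs ih =>
      rw [List.map_cons, List.sum_cons, ih, PySem.Dict.getD_counter, List.map_cons, List.sum_cons]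
      push_cast
      ring
  rw [zero_add, hT, decide_eq_decide]
  omega

-- ===== VERDICT (by name: the statement is the Claim_ definition above) =====
theorem numbercheck_spec : Claim_equal_numbercheck := by
  intro lisst find _
  show numbercheck lisst find = numbercheck_alt lisst find
  rw [nc_A_char, nc_B_char, nc_swap]
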